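-- pv_equiv track=rewrite | github.com/George-lewis/Golf | py/disjoint.py | disjoint
-- ===== SOURCE A (Python) =====
-- def disjoint(L):
--     out = []
--     for i in range(2**len(L)):
--         a = []
--         b = []
--         for j in range(len(L)):
--             if (i & (1 << j)):
--                 a.append(L[j])
--             else:
--                 b.append(L[j])
--         out.append((a, b))
--     return out
-- ===== SOURCE B (Python) =====
-- def disjoint(L):
--     if not L:
--         return [([], [])]
--     x = L[0]
--     out = []
--     for a, b in disjoint(L[1:]):
--         out.append((a, [x] + b))
--         out.append(([x] + a, b))
--     return out
-- ===== Notes on version B (the rewrite author's own statement) =====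
-- stated objective: alternative
-- what changed: Replaced the bitmask double loop (enumerate i in range(2**n), test each bit) with a structural recursion on the list that doubles the tail's partitions by placing the head into b then into a.
import Mathlib
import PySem

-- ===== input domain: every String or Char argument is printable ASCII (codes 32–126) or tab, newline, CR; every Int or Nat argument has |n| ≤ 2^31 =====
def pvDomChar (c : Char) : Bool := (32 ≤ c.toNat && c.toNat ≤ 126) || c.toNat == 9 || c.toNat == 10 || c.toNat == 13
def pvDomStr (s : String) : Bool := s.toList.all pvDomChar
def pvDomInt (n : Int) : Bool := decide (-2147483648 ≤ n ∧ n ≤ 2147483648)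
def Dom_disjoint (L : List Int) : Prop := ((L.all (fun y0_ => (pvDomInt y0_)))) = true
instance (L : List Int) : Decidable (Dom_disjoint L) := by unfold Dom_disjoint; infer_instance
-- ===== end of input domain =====

-- B replaces A's bitmask double loop with a structural recursion that doubles the tail's
-- partitions (head placed into b, then into a); same values, same order — objective: alternative.

-- ===== PORT A =====
-- A's inner 'for j in range(len(L))' loop: a/b built by append, 'i & (1 << j)' tests bit j.
def pvInnerA (L : List Int) (i : Int) : List Int × List Int :=
  (PySem.List.pyRange 0 (L.length : Int) 1).foldl
    (fun ab j =>
      if PySem.Int.band i ((1 : Int) <<< j.toNat) ≠ 0 then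
        (ab.1 ++ [PySem.List.pyGetD L j 0], ab.2)
      else
        (ab.1, ab.2 ++ [PySem.List.pyGetD L j 0]))
    ([], [])

def disjoint (L : List Int) : List (List Int × List Int) :=
  (PySem.List.pyRange 0 ((2 : Int) ^ L.length) 1).foldl
    (fun out i => out ++ [pvInnerA L i]) []

-- ===== PORT B =====
def disjoint_alt : List Int → List (List Int × List Int)
  | [] => [([], [])]
  | x :: T =>
    (disjoint_alt T).foldl
      (fun out ab => out ++ [(ab.1, x :: ab.2), (x :: ab.1, ab.2)]) []

-- ===== PRECONDITION & SPEC =====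
def Spec_disjoint (L : List Int) (out : List (List Int × List Int)) : Prop := out = disjoint_alt L
instance (L : List Int) (out : List (List Int × List Int)) : Decidable (Spec_disjoint L out) := by unfold Spec_disjoint; infer_instance

-- ===== CLAIM (what is proved, stated in full; the proofs are below) =====
def Claim_equal_disjoint : Prop := ∀ (L : List Int), Dom_disjoint L → Spec_disjoint L (disjoint L)

-- ===== LEMMAS AND PROOFS =====

-- The partition of L selected by bitmask m (bit 0 chooses the head), recursive form.
def pvPart : List Int → Nat → List Int × List Int
  | [], _ => ([], [])
  | x :: T, m =>
    let p := pvPart T (m / 2)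
    if m % 2 = 1 then (x :: p.1, p.2) else (p.1, x :: p.2)

-- A's inner loop over Nat indices.
def pvNatFold (L : List Int) (m : Nat) (ab : List Int × List Int) : List Int × List Int :=
  (List.range L.length).foldl
    (fun ab k => if m &&& (1 <<< k) ≠ 0 then (ab.1 ++ [L.getD k 0], ab.2)
                 else (ab.1, ab.2 ++ [L.getD k 0])) ab

theorem pvShiftCast (k : Nat) : ((1 : Int) <<< ((k : Int))) = ((1 <<< k : Nat) : Int) := by
  have h : ((1 : Int) <<< ((k : Int))) = ((Nat.shiftLeft' false 1 k : Nat) : Int) := rfl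
  rw [h, Nat.shiftLeft'_false]

theorem pvFoldAux (f : Nat → Prop) [DecidablePred f] (g : Nat → Int) :
    ∀ (ks : List Nat) (a b : List Int),
      ks.foldl (fun ab k => if f k then (ab.1 ++ [g k], ab.2) else (ab.1, ab.2 ++ [g k])) (a, b)
      = (a ++ (ks.foldl (fun ab k => if f k then (ab.1 ++ [g k], ab.2) else (ab.1, ab.2 ++ [g k])) ([], [])).1,
         b ++ (ks.foldl (fun ab k => if f k then (ab.1 ++ [g k], ab.2) else (ab.1, ab.2 ++ [g k])) ([], [])).2) := by
  intro ks
  induction ks with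
  | nil => intro a b; simp
  | cons k t ih =>
    intro a b
    by_cases hk : f k
    · simp only [List.foldl_cons, hk, if_true, List.nil_append]
      rw [ih, ih [g k] []]
      simp
    · simp only [List.foldl_cons, hk, if_false, List.nil_append]
      rw [ih, ih [] [g k]]
      simp

theorem pvInnerA_eq_natFold (L : List Int) (m : Nat) :
    pvInnerA L (m : Int) = pvNatFold L m ([], []) := by
  unfold pvInnerA pvNatFold
  rw [PySem.List.pyRange_zero_natCast, List.foldl_map]
  congr 1
  funext ab k
  rw [Int.toNat_natCast, pvShiftCast, PySem.Int.band_natCast]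
  simp [PySem.List.pyGetD_natCast]

theorem pvNatFold_cons (x : Int) (T : List Int) (m : Nat) :
    pvNatFold (x :: T) m ([], []) =
      if m % 2 = 1 then (x :: (pvNatFold T (m/2) ([], [])).1, (pvNatFold T (m/2) ([], [])).2)
      else ((pvNatFold T (m/2) ([], [])).1, x :: (pvNatFold T (m/2) ([], [])).2) := by
  unfold pvNatFold
  rw [show (x :: T).length = T.length + 1 from rfl, List.range_succ_eq_map,
      List.foldl_cons, List.foldl_map]
  have hfun : (fun (ab : List Int × List Int) (k : Nat) =>
        if m &&& (1 <<< Nat.succ k) ≠ 0 then (ab.1 ++ [(x :: T).getD (Nat.succ k) 0], ab.2)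
        else (ab.1, ab.2 ++ [(x :: T).getD (Nat.succ k) 0]))
      = (fun ab k => if (m/2) &&& (1 <<< k) ≠ 0 then (ab.1 ++ [T.getD k 0], ab.2)
                     else (ab.1, ab.2 ++ [T.getD k 0])) := by
    funext ab k
    have hb : (m &&& (1 <<< (k+1)) ≠ 0) ↔ ((m/2) &&& (1 <<< k) ≠ 0) := by
      simp [Nat.shiftLeft_eq, Nat.and_two_pow, Nat.testBit_succ]
    simp [Nat.succ_eq_add_one, hb]
  rw [hfun]
  have h0 : (m &&& (1 <<< 0) ≠ 0) ↔ m % 2 = 1 := by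
    simp [Nat.shiftLeft_eq]
  simp only [List.getD_cons_zero, List.nil_append]
  by_cases hm : m % 2 = 1
  · rw [if_pos (h0.mpr hm), if_pos hm,
        pvFoldAux (fun k => (m/2) &&& (1 <<< k) ≠ 0) (fun k => T.getD k 0) (List.range T.length) [x] []]
    simp
  · rw [if_neg (fun h => hm (h0.mp h)), if_neg hm,
        pvFoldAux (fun k => (m/2) &&& (1 <<< k) ≠ 0) (fun k => T.getD k 0) (List.range T.length) [] [x]]
    simp

theorem pvNatFold_eq_part : ∀ (L : List Int) (m : Nat), pvNatFold L m ([], []) = pvPart L m := by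
  intro L
  induction L with
  | nil => intro m; simp [pvNatFold, pvPart]
  | cons x T ih =>
    intro m
    rw [pvNatFold_cons, ih]
    by_cases hm : m % 2 = 1 <;> simp [pvPart, hm]

theorem pvDisjoint_eq (L : List Int) :
    disjoint L = (List.range (2 ^ L.length)).map (pvPart L) := by
  unfold disjoint
  rw [PySem.List.foldl_append_singleton_eq_map,
      show ((2 : Int) ^ L.length) = ((2 ^ L.length : Nat) : Int) from by push_cast; ring,
      PySem.List.pyRange_zero_natCast, List.map_map]
  have h : (pvInnerA L ∘ Nat.cast) = pvPart L := by
    funext k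
    exact (pvInnerA_eq_natFold L k).trans (pvNatFold_eq_part L k)
  rw [h]
  simp

theorem pvRangeDouble {α : Type} (g : Nat → α) :
    ∀ m : Nat, (List.range (2*m)).map g
      = (List.range m).flatMap (fun k => [g (2*k), g (2*k+1)]) := by
  intro m
  induction m with
  | zero => simp
  | succ m ih =>
    rw [show 2*(m+1) = (2*m + 1) + 1 from by ring, List.range_succ, List.range_succ,
        List.map_append, List.map_append, List.range_succ, List.flatMap_append, ih]
    simp

theorem pvAlt_eq : ∀ (L : List Int),
    disjoint_alt L = (List.range (2 ^ L.length)).map (pvPart L) := by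
  intro L
  induction L with
  | nil => simp [disjoint_alt, pvPart]
  | cons x T ih =>
    simp only [disjoint_alt]
    rw [PySem.List.foldl_append_eq_flatMap
          (fun ab : List Int × List Int => [(ab.1, x :: ab.2), (x :: ab.1, ab.2)]),
        ih, List.flatMap_map,
        show (2 : Nat) ^ (x :: T).length = 2 * 2 ^ T.length from by
          simp [List.length_cons, pow_succ]; ring,
        pvRangeDouble]
    have h : (fun k : Nat => [pvPart (x :: T) (2*k), pvPart (x :: T) (2*k+1)])
        = ((fun ab : List Int × List Int => [(ab.1, x :: ab.2), (x :: ab.1, ab.2)]) ∘ pvPart T) := by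
      funext k
      have h1 : pvPart (x :: T) (2*k) = ((pvPart T k).1, x :: (pvPart T k).2) := by
        simp [pvPart, Nat.mul_mod_right, show (2*k)/2 = k from by omega]
      have h2 : pvPart (x :: T) (2*k+1) = (x :: (pvPart T k).1, (pvPart T k).2) := by
        simp [pvPart, show (2*k+1) % 2 = 1 from by omega, show (2*k+1)/2 = k from by omega]
      simp [h1, h2]
    rw [h]
    rfl

-- ===== VERDICT (by name: the statement is the Claim_ definition above) =====
theorem disjoint_spec : Claim_equal_disjoint := by
  intro L _
  unfold Spec_disjoint
  rw [pvDisjoint_eq, pvAlt_eq]
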